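-- pv_equiv track=rewrite | github.com/facebook/fbthrift | thrift/lib/py/transport/TSSLSocket.py | _matchName
-- ===== SOURCE A (Python) =====
-- def _matchName(name, pattern):
--     """match a DNS name against a pattern. match is not case sensitive.
--     a '*' in the pattern will match any single component of name."""
--     name_parts = name.split('.')
--     pattern_parts = pattern.split('.')
--     if len(name_parts) != len(pattern_parts):
--         return False
--     for n, p in zip(name_parts, pattern_parts):
--         if p != '*' and (n.lower() != p.lower()):
--             return False
--     return True
-- ===== SOURCE B (Python) =====
-- def _matchName(name, pattern):
--     """match a DNS name against a pattern. match is not case sensitive.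
--     a '*' in the pattern will match any single component of name."""
--     n = name.lower()
--     p = pattern.lower()
--     N = len(n)
--     P = len(p)
--     i = j = 0
--     while True:
--         # at the start of a component in both strings
--         if j < P and p[j] == '*' and (j + 1 == P or p[j + 1] == '.'):
--             # wildcard component: skip one whole name component
--             j += 1
--             while i < N and n[i] != '.':
--                 i += 1
--         else:
--             # literal component: compare characters until a dot or an end
--             while i < N and j < P and n[i] != '.' and p[j] != '.':
--                 if n[i] != p[j]:
--                     return False
--                 i += 1
--                 j += 1
--         # both scans must sit at a component boundary now
--         if i == N and j == P:
--             return True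
--         if i < N and j < P and n[i] == '.' and p[j] == '.':
--             i += 1
--             j += 1
--             continue
--         return False
-- ===== Notes on version B (the rewrite author's own statement) =====
-- stated objective: alternative
-- what changed: B replaces A's split-into-component-lists plus length-check plus zip loop by a single left-to-right character scan over the two pre-lowercased strings, matching wildcard components by skipping to the next dot, so no intermediate component lists are built.
import Mathlib
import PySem

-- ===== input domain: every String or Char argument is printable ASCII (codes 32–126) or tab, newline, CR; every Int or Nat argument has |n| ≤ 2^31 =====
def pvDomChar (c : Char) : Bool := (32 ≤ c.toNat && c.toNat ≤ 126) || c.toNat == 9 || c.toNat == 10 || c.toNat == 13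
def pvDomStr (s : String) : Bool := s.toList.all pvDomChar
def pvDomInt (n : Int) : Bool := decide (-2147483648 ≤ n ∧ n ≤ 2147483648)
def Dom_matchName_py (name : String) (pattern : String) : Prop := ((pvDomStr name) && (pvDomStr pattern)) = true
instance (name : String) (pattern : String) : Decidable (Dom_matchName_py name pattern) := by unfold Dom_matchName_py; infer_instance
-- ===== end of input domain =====

-- B replaces A's split-into-components + zip comparison by a single character scan
-- over the pre-lowercased strings (objective: alternative, same asymptotic cost).

-- ===== PORT A =====
-- name.split('.'), pattern.split('.'), length check, then the zip loop with early return False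
def matchName_py (name : String) (pattern : String) : Bool :=
  let nameParts := PySem.Chars.splitOn name.toList ['.']
  let patternParts := PySem.Chars.splitOn pattern.toList ['.']
  if nameParts.length ≠ patternParts.length then false
  else (nameParts.zip patternParts).all fun np =>
    if np.2 ≠ ['*'] ∧ PySem.Chars.lower np.1 ≠ PySem.Chars.lower np.2 then false else true

-- ===== PORT B =====
-- B's outer while-loop = pvScan (at a component start), its literal inner while = pvLit,
-- its boundary check/step = pvBound; the star branch's skip-loop is dropWhile.
mutual
-- component start: a '*' component matches a run of non-dots, else scan literally
def pvScan : List Char → List Char → Bool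
  | n, p =>
    if h : p.head? = some '*' ∧ (p.tail = [] ∨ p.tail.head? = some '.') then
      pvBound (n.dropWhile (· ≠ '.')) p.tail
    else pvLit n p
termination_by n p => (n.length + p.length, 2)
decreasing_by
· have hp : p ≠ [] := by intro hnil; simp [hnil] at h
  have : p.tail.length < p.length := by
    cases p with | nil => exact absurd rfl hp | cons a t => simp
  have hn := List.length_dropWhile_le (fun c => decide (c ≠ '.')) n
  exact Prod.Lex.left _ _ (by omega)
· exact Prod.Lex.right _ (by omega)

-- inside a literal component: consume equal non-dot characters, fail on mismatch
def pvLit : List Char → List Char → Bool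
  | c::n', d::p' =>
    if c ≠ '.' ∧ d ≠ '.' then
      if c = d then pvLit n' p' else false
    else pvBound (c::n') (d::p')
  | n, p => pvBound n p
termination_by n p => (n.length + p.length, 1)
decreasing_by
· exact Prod.Lex.left _ _ (by simp; omega)
· exact Prod.Lex.right _ (by omega)
· exact Prod.Lex.right _ (by omega)

-- both scans must sit at a component boundary: end on both, or a dot on both
def pvBound : List Char → List Char → Bool
  | [], [] => true
  | '.'::n', '.'::p' => pvScan n' p'
  | _, _ => false
termination_by n p => (n.length + p.length, 0)
decreasing_by
  exact Prod.Lex.left _ _ (by simp; omega)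
end

def matchName_py_alt (name : String) (pattern : String) : Bool :=
  pvScan (PySem.Chars.lower name.toList) (PySem.Chars.lower pattern.toList)

-- ===== PRECONDITION & SPEC =====
def Spec_matchName_py (name : String) (pattern : String) (out : Bool) : Prop := out = matchName_py_alt name pattern
instance (name : String) (pattern : String) (out : Bool) : Decidable (Spec_matchName_py name pattern out) := by unfold Spec_matchName_py; infer_instance

-- ===== CLAIM (what is proved, stated in full; the proofs are below) =====
def Claim_equal_matchName_py : Prop := ∀ (name : String) (pattern : String), Dom_matchName_py name pattern → Spec_matchName_py name pattern (matchName_py name pattern)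

-- ===== LEMMAS AND PROOFS =====

def pvSplit (l : List Char) : List (List Char) := List.splitOnP (fun c => c == '.') l
def pvRest (l : List Char) : List (List Char) :=
  match l.dropWhile (fun c => decide (c ≠ '.')) with
  | [] => []
  | _ :: t => pvSplit t
def pvPM (ns ps : List (List Char)) : Bool :=
  (ns.length == ps.length) &&
    (ns.zip ps).all fun ab => decide (ab.2 = ['*']) || decide (ab.1 = ab.2)
def pvLitSpec (n p : List Char) : Bool :=
  decide (n.takeWhile (fun c => decide (c ≠ '.')) = p.takeWhile (fun c => decide (c ≠ '.')))
    && pvPM (pvRest n) (pvRest p)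
def pvBoundSpec : List Char → List Char → Bool
  | [], [] => true
  | '.'::a, '.'::b => pvPM (pvSplit a) (pvSplit b)
  | _, _ => false

theorem pvSplit_eq (l : List Char) :
    pvSplit l = l.takeWhile (fun c => decide (c ≠ '.')) :: pvRest l := by
  induction l with
  | nil => simp [pvSplit, pvRest]
  | cons c t ih =>
    by_cases hc : c = '.'
    · subst hc
      simp [pvSplit, pvRest, List.splitOnP_cons]
    · show List.splitOnP (fun c => c == '.') (c :: t) = _
      rw [List.splitOnP_cons, if_neg (by simp [hc])]
      simp only [pvSplit] at *
      rw [ih]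
      have h1 : (c :: t).takeWhile (fun c => decide (c ≠ '.')) = c :: t.takeWhile (fun c => decide (c ≠ '.')) := by
        simp [hc]
      have h2 : pvRest (c :: t) = pvRest t := by
        simp [pvRest, hc]
      rw [h1, h2]
      rfl

theorem pvPM_cons (a b : List Char) (ns ps : List (List Char)) :
    pvPM (a :: ns) (b :: ps) = ((decide (b = ['*']) || decide (a = b)) && pvPM ns ps) := by
  apply Bool.eq_iff_iff.mpr
  simp only [pvPM, Bool.and_eq_true, Bool.or_eq_true, List.all_cons, List.zip_cons_cons,
    List.length_cons, beq_iff_eq, decide_eq_true_eq, Nat.add_right_cancel_iff]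
  tauto

theorem pvDrop_head (n : List Char) (c : Char) (t : List Char)
    (h : n.dropWhile (fun c => decide (c ≠ '.')) = c :: t) : c = '.' := by
  induction n with
  | nil => simp at h
  | cons a n' ih =>
    rw [List.dropWhile_cons] at h
    by_cases ha : a = '.'
    · rw [if_neg (by simp [ha])] at h
      cases h; exact ha
    · rw [if_pos (by simp [ha])] at h
      exact ih h

theorem pvBoundSpec_left (c : Char) (hc : c ≠ '.') (a p : List Char) :
    pvBoundSpec (c :: a) p = false := by
  unfold pvBoundSpec
  split <;> simp_all

theorem pvBoundSpec_right (d : Char) (hd : d ≠ '.') (n b : List Char) :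
    pvBoundSpec n (d :: b) = false := by
  unfold pvBoundSpec
  split <;> simp_all

theorem pvPM_nil_left (x : List Char) (xs : List (List Char)) : pvPM [] (x :: xs) = false := by
  simp [pvPM]
theorem pvPM_nil_right (x : List Char) (xs : List (List Char)) : pvPM (x :: xs) [] = false := by
  simp [pvPM]

theorem pvTkRest_dot (x : List Char) :
    ('.' :: x).takeWhile (fun c => decide (c ≠ '.')) = [] ∧ pvRest ('.' :: x) = pvSplit x := by
  constructor
  · simp
  · simp [pvRest]

theorem pvTkRest_notdot (c : Char) (hc : c ≠ '.') (x : List Char) :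
    (c :: x).takeWhile (fun c => decide (c ≠ '.')) = c :: x.takeWhile (fun c => decide (c ≠ '.'))
      ∧ pvRest (c :: x) = pvRest x := by
  constructor
  · simp [hc]
  · simp [pvRest, hc]

theorem pvTk_ne_star (p : List Char)
    (h : ¬(p.head? = some '*' ∧ (p.tail = [] ∨ p.tail.head? = some '.'))) :
    p.takeWhile (fun c => decide (c ≠ '.')) ≠ ['*'] := by
  intro htk
  apply h
  cases p with
  | nil => simp at htk
  | cons d p' =>
    rw [List.takeWhile_cons] at htk
    by_cases hd : d = '.'
    · rw [if_neg (by simp [hd])] at htk; cases htk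
    · rw [if_pos (by simp [hd])] at htk
      injection htk with hd' htk'
      subst hd'
      refine ⟨rfl, ?_⟩
      cases p' with
      | nil => exact Or.inl rfl
      | cons e p'' =>
        right
        rw [List.takeWhile_cons] at htk'
        by_cases he : e = '.'
        · simp [he]
        · rw [if_pos (by simp [he])] at htk'; cases htk'

theorem pvRest_nil (n : List Char) (h : n.dropWhile (fun c => decide (c ≠ '.')) = []) :
    pvRest n = [] := by
  unfold pvRest; rw [h]

theorem pvRest_cons (n : List Char) (c : Char) (t : List Char)
    (h : n.dropWhile (fun c => decide (c ≠ '.')) = c :: t) :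
    pvRest n = pvSplit t := by
  unfold pvRest; rw [h]

theorem pvScan_eq_pvPM (n p : List Char) : pvScan n p = pvPM (pvSplit n) (pvSplit p) := by
  refine pvScan.induct
    (fun n p => pvScan n p = pvPM (pvSplit n) (pvSplit p))
    (fun n p => pvLit n p = pvLitSpec n p)
    (fun n p => pvBound n p = pvBoundSpec n p)
    ?c1 ?c2 ?c3 ?c4 ?c5 ?c6 ?c7 ?c8 ?c9 n p
  case c1 =>
    intro n p h ih
    rw [pvScan, dif_pos h, ih]
    obtain ⟨h1, h2⟩ := h
    cases p with
    | nil => cases h1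
    | cons d p' =>
      have hd : d = '*' := by cases h1; rfl
      subst hd
      simp only [List.tail_cons] at h2 ⊢
      have hsplitp : pvSplit ('*' :: p') = List.modifyHead (List.cons '*') (pvSplit p') := by
        simp [pvSplit, List.splitOnP_cons]
      rcases h2 with h2 | h2
      · subst h2
        rw [hsplitp]
        rw [show pvSplit [] = [[]] by simp [pvSplit]]
        rw [show List.modifyHead (List.cons '*') [([] : List Char)] = [['*']] from rfl]
        rw [pvSplit_eq n, pvPM_cons]
        rw [show decide ((['*'] : List Char) = ['*']) = true by decide]
        simp only [Bool.true_or, Bool.true_and]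
        rcases hdw : n.dropWhile (fun c => decide (c ≠ '.')) with _ | ⟨c, t⟩
        · rw [pvRest_nil n hdw]
          simp [pvPM, pvBoundSpec]
        · have hc := pvDrop_head n c t hdw
          subst hc
          rw [show pvBoundSpec ('.' :: t) [] = false from rfl]
          rw [pvRest_cons n '.' t hdw]
          rw [pvSplit_eq t, pvPM_nil_right]
      · cases p' with
        | nil => cases h2
        | cons e p'' =>
          have he : e = '.' := by cases h2; rfl
          subst he
          rw [hsplitp]
          rw [show pvSplit ('.' :: p'') = [] :: pvSplit p'' by simp [pvSplit, List.splitOnP_cons]]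
          rw [show List.modifyHead (List.cons '*') ([] :: pvSplit p'') = ['*'] :: pvSplit p'' from rfl]
          rw [pvSplit_eq n, pvPM_cons]
          rw [show decide ((['*'] : List Char) = ['*']) = true by decide]
          simp only [Bool.true_or, Bool.true_and]
          rcases hdw : n.dropWhile (fun c => decide (c ≠ '.')) with _ | ⟨c, t⟩
          · rw [show pvBoundSpec [] ('.' :: p'') = false from rfl]
            rw [pvRest_nil n hdw]
            rw [pvSplit_eq p'', pvPM_nil_left]
          · have hc := pvDrop_head n c t hdw
            subst hc
            rw [show pvBoundSpec ('.' :: t) ('.' :: p'') = pvPM (pvSplit t) (pvSplit p'') from rfl]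
            rw [pvRest_cons n '.' t hdw]
  case c2 =>
    intro n p h ih
    rw [pvScan, dif_neg h, ih]
    have hstar := pvTk_ne_star p h
    rw [pvSplit_eq n, pvSplit_eq p, pvPM_cons, pvLitSpec]
    rw [show decide (p.takeWhile (fun c => decide (c ≠ '.')) = ['*']) = false from decide_eq_false hstar]
    simp
  case c3 =>
    intro n' d p' hd ih
    rw [pvLit, if_pos ⟨hd.1, hd.2⟩, if_pos rfl, ih]
    unfold pvLitSpec
    rw [(pvTkRest_notdot d hd.1 n').1, (pvTkRest_notdot d hd.1 p').1,
        (pvTkRest_notdot d hd.1 n').2, (pvTkRest_notdot d hd.1 p').2]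
    simp
  case c4 =>
    intro c n' d p' hcd hne
    rw [pvLit, if_pos hcd, if_neg hne]
    unfold pvLitSpec
    rw [(pvTkRest_notdot c hcd.1 n').1, (pvTkRest_notdot d hcd.2 p').1]
    rw [show decide ((c :: n'.takeWhile (fun c => decide (c ≠ '.'))) = (d :: p'.takeWhile (fun c => decide (c ≠ '.')))) = false by
      simp [hne]]
    simp
  case c5 =>
    intro c n' d p' hcd ih
    rw [pvLit, if_neg hcd, ih]
    by_cases hc : c = '.'
    · by_cases hdp : d = '.'
      · subst hc; subst hdp
        rw [show pvBoundSpec ('.' :: n') ('.' :: p') = pvPM (pvSplit n') (pvSplit p') from rfl]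
        unfold pvLitSpec
        rw [(pvTkRest_dot n').1, (pvTkRest_dot p').1, (pvTkRest_dot n').2, (pvTkRest_dot p').2]
        simp
      · subst hc
        rw [pvBoundSpec_right d hdp]
        unfold pvLitSpec
        rw [(pvTkRest_dot n').1, (pvTkRest_notdot d hdp p').1]
        simp
    · have hdp : d = '.' := by
        by_contra hdd
        exact hcd ⟨hc, hdd⟩
      subst hdp
      rw [pvBoundSpec_left c hc]
      unfold pvLitSpec
      rw [(pvTkRest_notdot c hc n').1, (pvTkRest_dot p').1]
      simp
  case c6 =>
    intro n p hshape ih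
    rw [pvLit.eq_2 n p hshape, ih]
    cases n with
    | nil =>
      cases p with
      | nil =>
        unfold pvLitSpec
        simp [pvRest, pvPM, pvBoundSpec]
      | cons d p' =>
        rw [show pvBoundSpec [] (d :: p') = false by
          unfold pvBoundSpec
          split
          · rename_i heq; cases heq
          · rename_i heq _; cases heq
          · rfl]
        unfold pvLitSpec
        by_cases hd : d = '.'
        · subst hd
          rw [(pvTkRest_dot p').1, (pvTkRest_dot p').2]
          rw [show ([] : List Char).takeWhile (fun c => decide (c ≠ '.')) = [] from rfl]
          rw [show pvRest [] = [] from rfl]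
          rw [pvSplit_eq p', pvPM_nil_left]
          simp
        · rw [(pvTkRest_notdot d hd p').1]
          simp
    | cons c n' =>
      cases p with
      | nil =>
        rw [show pvBoundSpec (c :: n') [] = false by
          unfold pvBoundSpec
          split
          · rename_i heq _; cases heq
          · rename_i _ heq; cases heq
          · rfl]
        unfold pvLitSpec
        by_cases hc : c = '.'
        · subst hc
          rw [(pvTkRest_dot n').1, (pvTkRest_dot n').2]
          rw [show ([] : List Char).takeWhile (fun c => decide (c ≠ '.')) = [] from rfl]
          rw [show pvRest [] = [] from rfl]
          rw [pvSplit_eq n', pvPM_nil_right]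
          simp
        · rw [(pvTkRest_notdot c hc n').1]
          simp
      | cons d p' => exact (hshape c n' d p' rfl rfl).elim
  case c7 =>
    show pvBound [] [] = pvBoundSpec [] []
    rw [pvBound.eq_1]; rfl
  case c8 =>
    intro n' p' ih
    rw [pvBound.eq_2, ih]
    rfl
  case c9 =>
    intro x y h1 h2
    rw [pvBound.eq_3 x y h1 h2]
    unfold pvBoundSpec
    split <;> simp_all

theorem go_dot : ∀ (l : List Char) (fuel : Nat) (cur : List Char) (acc : List (List Char)),
    l.length + 1 ≤ fuel →
    PySem.Chars.splitOn.go ['.'] fuel l cur acc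
      = acc.reverse ++ (pvSplit l).modifyHead (cur.reverse ++ ·) := by
  intro l
  induction l with
  | nil =>
    intro fuel cur acc hf
    cases fuel with
    | zero => omega
    | succ f => simp [PySem.Chars.splitOn.go, pvSplit]
  | cons c rest ih =>
    intro fuel cur acc hf
    cases fuel with
    | zero => omega
    | succ f =>
      rw [PySem.Chars.splitOn.go]
      by_cases hc : c = '.'
      · subst hc
        rw [if_pos (by simp [List.isPrefixOf])]
        rw [show List.drop (['.'] : List Char).length ('.' :: rest) = rest from rfl]
        simp only [List.length_cons] at hf
        rw [ih f [] (cur.reverse :: acc) (by omega)]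
        simp only [pvSplit, List.splitOnP_cons, if_pos (by decide : (('.' : Char) == '.') = true)]
        simp only [List.reverse_cons, List.modifyHead_cons, List.append_nil]
        rw [show (fun x : List Char => [].reverse ++ x) = id from (by funext x; simp), List.modifyHead_id]
        simp
      · rw [if_neg (by simp [List.isPrefixOf, Ne.symm hc])]
        simp only [List.length_cons] at hf
        rw [ih f (c :: cur) acc (by omega)]
        simp only [pvSplit, List.splitOnP_cons, if_neg (by simp [hc] : ¬ ((fun c => c == '.') c = true))]
        rcases hsp : List.splitOnP (fun c => c == '.') rest with _ | ⟨a, r⟩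
        · exact absurd hsp (List.splitOnP_ne_nil _ _)
        · simp

theorem pvSplitOn_dot (l : List Char) : PySem.Chars.splitOn l ['.'] = pvSplit l := by
  unfold PySem.Chars.splitOn
  rw [go_dot l (l.length + 1) [] [] (by omega)]
  rcases hsp : pvSplit l with _ | ⟨a, r⟩
  · exact absurd hsp (List.splitOnP_ne_nil _ _)
  · simp

theorem pvLowerChar_eq_iff (c d : Char) (hd1 : d.toNat < 97 ∨ 122 < d.toNat)
    (hd2 : d.toNat < 65 ∨ 90 < d.toNat) :
    (PySem.Chars.lowerChar c = d) ↔ c = d := by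
  unfold PySem.Chars.lowerChar PySem.Chars.isupper
  split
  · rename_i h
    simp at h
    have hA : 65 ≤ c.toNat := h.1
    have hZ : c.toNat ≤ 90 := h.2
    have hv : (c.toNat + 32).isValidChar := Or.inl (by omega)
    constructor
    · intro he
      have ht := congrArg Char.toNat he
      rw [Char.toNat_ofNat, if_pos hv] at ht
      omega
    · intro he
      have : c.toNat = d.toNat := by rw [he]
      omega
  · simp

theorem pvSplit_lower (l : List Char) :
    pvSplit (PySem.Chars.lower l) = (pvSplit l).map PySem.Chars.lower := by
  induction l with
  | nil => simp [pvSplit, PySem.Chars.lower]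
  | cons c t ih =>
    show List.splitOnP _ (PySem.Chars.lowerChar c :: PySem.Chars.lower t) = _
    rw [List.splitOnP_cons]
    by_cases h : c = '.'
    · subst h
      rw [if_pos (by decide)]
      show _ = List.map _ (List.splitOnP (fun c => c == '.') ('.' :: t))
      rw [List.splitOnP_cons, if_pos (by decide)]
      simp only [List.map_cons]
      rw [show List.splitOnP (fun c => c == '.') (PySem.Chars.lower t) = pvSplit (PySem.Chars.lower t) from rfl, ih]
      rfl
    · have hlc : ¬ PySem.Chars.lowerChar c = '.' := fun hh => h ((pvLowerChar_eq_iff c '.' (by decide) (by decide)).mp hh)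
      rw [if_neg (by simp [hlc])]
      show _ = List.map _ (List.splitOnP (fun c => c == '.') (c :: t))
      rw [List.splitOnP_cons, if_neg (by simp [h])]
      rw [show List.splitOnP (fun c => c == '.') (PySem.Chars.lower t) = pvSplit (PySem.Chars.lower t) from rfl, ih]
      rw [show List.splitOnP (fun c => c == '.') t = pvSplit t from rfl, pvSplit_eq t]
      simp [PySem.Chars.lower]

theorem pvLower_eq_star (b : List Char) :
    (PySem.Chars.lower b = ['*']) ↔ b = ['*'] := by
  cases b with
  | nil => simp [PySem.Chars.lower]
  | cons x xs =>
    simp only [PySem.Chars.lower, List.map_cons, List.cons.injEq, List.map_eq_nil_iff]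
    constructor
    · rintro ⟨h1, h2⟩
      exact ⟨(pvLowerChar_eq_iff x '*' (by decide) (by decide)).mp h1, h2⟩
    · rintro ⟨h1, h2⟩
      exact ⟨(pvLowerChar_eq_iff x '*' (by decide) (by decide)).mpr h1, h2⟩

theorem pvFinal (Ns Ps : List (List Char)) :
    (if Ns.length ≠ Ps.length then false
     else (Ns.zip Ps).all fun np =>
       if np.2 ≠ ['*'] ∧ PySem.Chars.lower np.1 ≠ PySem.Chars.lower np.2 then false else true)
    = pvPM (Ns.map PySem.Chars.lower) (Ps.map PySem.Chars.lower) := by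
  by_cases h : Ns.length = Ps.length
  · rw [if_neg (by simp [h])]
    unfold pvPM
    rw [show ((Ns.map PySem.Chars.lower).length == (Ps.map PySem.Chars.lower).length) = true by simp [h]]
    simp only [Bool.true_and, List.zip_map, List.all_map]
    apply List.all_congr rfl
    intro ab
    by_cases h1 : ab.2 = ['*'] <;> by_cases h2 : PySem.Chars.lower ab.1 = PySem.Chars.lower ab.2 <;>
      simp [Function.comp, h1, h2, pvLower_eq_star]
  · rw [if_pos h]
    simp [pvPM, h]

-- ===== VERDICT (by name: the statement is the Claim_ definition above) =====
theorem matchName_py_spec : Claim_equal_matchName_py := by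
  intro name pattern _
  unfold Spec_matchName_py matchName_py matchName_py_alt
  rw [pvScan_eq_pvPM, pvSplitOn_dot, pvSplitOn_dot, pvSplit_lower, pvSplit_lower]
  exact pvFinal (pvSplit name.toList) (pvSplit pattern.toList)
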